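-- pv_equiv track=rewrite | github.com/epieczko/betty | skills/artifact.create/artifact_create.py | populate_markdown_template
-- ===== SOURCE A (Python) =====
-- def populate_markdown_template(template_content: str, context: str, artifact_type: str) -> str:
--     """Populate Markdown template with context-aware content"""
--
--     # Add context as a note in the document
--     lines = template_content.split('\n')
--     result_lines = []
--
--     # Find the first heading and add context after it
--     first_heading_found = False
--     for line in lines:
--         result_lines.append(line)
--
--         if not first_heading_found and line.startswith('# '):
--             first_heading_found = True
--             result_lines.append('')
--             result_lines.append(f'> **Context**: {context}')
--             result_lines.append('')
--
--     return '\n'.join(result_lines)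
-- ===== SOURCE B (Python) =====
-- def populate_markdown_template(template_content: str, context: str, artifact_type: str) -> str:
--     """Populate Markdown template with context-aware content"""
--     lines = template_content.split('\n')
--     i = next((k for k, line in enumerate(lines) if line.startswith('# ')), None)
--     if i is None:
--         return '\n'.join(lines)
--     note = ['', f'> **Context**: {context}', '']
--     return '\n'.join(lines[:i + 1] + note + lines[i + 1:])
-- ===== Notes on version B (the rewrite author's own statement) =====
-- stated objective: simpler
-- what changed: Replaces A's single accumulate-with-flag loop by a two-phase locate-then-splice: find the index of the first '# ' line, then splice the context note in by list slicing.
import Mathlib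
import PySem

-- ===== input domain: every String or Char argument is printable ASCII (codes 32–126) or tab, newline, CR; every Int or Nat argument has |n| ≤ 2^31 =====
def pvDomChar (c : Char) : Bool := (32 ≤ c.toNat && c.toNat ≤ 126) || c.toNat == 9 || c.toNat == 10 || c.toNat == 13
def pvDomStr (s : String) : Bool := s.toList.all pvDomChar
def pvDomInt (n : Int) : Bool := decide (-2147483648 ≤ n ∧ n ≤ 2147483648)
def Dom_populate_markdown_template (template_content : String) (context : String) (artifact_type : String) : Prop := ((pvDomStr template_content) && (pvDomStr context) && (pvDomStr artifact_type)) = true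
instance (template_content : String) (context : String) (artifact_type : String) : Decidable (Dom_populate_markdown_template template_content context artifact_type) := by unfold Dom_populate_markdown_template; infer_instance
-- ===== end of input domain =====

-- B replaces A's accumulate-with-flag loop by a locate-then-splice decomposition (simpler); same return value everywhere.

-- ===== PORT A =====
-- the loop over lines, carrying the flag and result_lines
def pmtLoopA (context : String) : List String → Bool → List String → List String
  | [], _, acc => acc
  | line :: rest, found, acc =>
    let acc := acc ++ [line]
    if !found && PySem.Str.startswith line "# " then
      pmtLoopA context rest true (acc ++ ["", "> **Context**: " ++ context, ""])
    else
      pmtLoopA context rest found acc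

def populate_markdown_template (template_content : String) (context : String) (artifact_type : String) : String :=
  -- "\n" ≠ "", so split? is exact for s.split('\n') (getD is never taken)
  let lines := (PySem.Str.split? template_content "\n").getD []
  PySem.Str.join "\n" (pmtLoopA context lines false [])

-- ===== PORT B =====
-- next((k for k,line in enumerate(lines) if line.startswith('# ')), None) = List.findIdx?;
-- lines[:i+1] / lines[i+1:] with 0 ≤ i+1 ≤ len are exactly take/drop
def populate_markdown_template_alt (template_content : String) (context : String) (artifact_type : String) : String :=
  -- "\n" ≠ "", so split? is exact for s.split('\n') (getD is never taken)
  let lines := (PySem.Str.split? template_content "\n").getD []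
  match lines.findIdx? (fun line => PySem.Str.startswith line "# ") with
  | none => PySem.Str.join "\n" lines
  | some i =>
    let note := ["", "> **Context**: " ++ context, ""]
    PySem.Str.join "\n" (lines.take (i + 1) ++ note ++ lines.drop (i + 1))

-- ===== PRECONDITION & SPEC =====
def Spec_populate_markdown_template (template_content : String) (context : String) (artifact_type : String) (out : String) : Prop := out = populate_markdown_template_alt template_content context artifact_type
instance (template_content : String) (context : String) (artifact_type : String) (out : String) : Decidable (Spec_populate_markdown_template template_content context artifact_type out) := by unfold Spec_populate_markdown_template; infer_instance

-- ===== CLAIM (what is proved, stated in full; the proofs are below) =====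
def Claim_equal_populate_markdown_template : Prop := ∀ (template_content : String) (context : String) (artifact_type : String), Dom_populate_markdown_template template_content context artifact_type → Spec_populate_markdown_template template_content context artifact_type (populate_markdown_template template_content context artifact_type)

-- ===== LEMMAS AND PROOFS =====

-- once the flag is set, the loop just appends the remaining lines
theorem pmtLoopA_found (context : String) (ls : List String) (acc : List String) :
    pmtLoopA context ls true acc = acc ++ ls := by
  induction ls generalizing acc with
  | nil => simp [pmtLoopA]
  | cons l ls ih => simp [pmtLoopA, ih]

-- characterisation of the flag-false loop by the first heading index
theorem pmtLoopA_eq (context : String) (ls : List String) (acc : List String) :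
    pmtLoopA context ls false acc =
      match ls.findIdx? (fun line => PySem.Str.startswith line "# ") with
      | none => acc ++ ls
      | some i => acc ++ (ls.take (i + 1) ++ ["", "> **Context**: " ++ context, ""] ++ ls.drop (i + 1)) := by
  induction ls generalizing acc with
  | nil => simp [pmtLoopA]
  | cons l ls ih =>
    by_cases h : PySem.Chars.startswith l.toList "# ".toList = true
    · simp at h
      simp [pmtLoopA, h, pmtLoopA_found, List.findIdx?_cons]
    · simp at h
      simp only [PySem.Str.startswith_eq] at ih
      simp [pmtLoopA, h, List.findIdx?_cons, ih]
      cases ls.findIdx? (fun line => PySem.Chars.startswith line.toList ['#', ' ']) <;> simp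

-- ===== VERDICT (by name: the statement is the Claim_ definition above) =====
theorem populate_markdown_template_spec : Claim_equal_populate_markdown_template := by
  intro t c a _
  unfold Spec_populate_markdown_template populate_markdown_template populate_markdown_template_alt
  simp only [pmtLoopA_eq]
  cases ((PySem.Str.split? t "\n").getD []).findIdx? (fun line => PySem.Str.startswith line "# ") <;> simp
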